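-- pv_equiv track=rewrite | github.com/M-Phuykong/NEDC_Style_Checker | NEDC_Style_Checker.py | expand_indent
-- ===== SOURCE A (Python) =====
-- def expand_indent(line):
--     r"""Return the amount of indentation.
--
--     Tabs are expanded to the next multiple of 8.
--
--     >>> expand_indent('    ')
--     4
--     >>> expand_indent('\t')
--     8
--     >>> expand_indent('       \t')
--     8
--     >>> expand_indent('        \t')
--     16
--     """
--     line = line.rstrip('\n\r')
--     if '\t' not in line:
--         return len(line) - len(line.lstrip())
--     result = 0
--     for char in line:
--         if char == '\t':
--             result = result // 8 * 8 + 8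
--         elif char == ' ':
--             result += 1
--         else:
--             break
--     return result
-- ===== SOURCE B (Python) =====
-- def expand_indent(line):
--     """Return the amount of indentation; tabs expand to the next multiple of 8."""
--     line = line.rstrip('\n\r')
--     if '\t' not in line:
--         return len(line) - len(line.lstrip())
--     stripped = line.lstrip(' \t')
--     lead = line[:len(line) - len(stripped)]
--     return len(lead.expandtabs(8))
-- ===== Notes on version B (the rewrite author's own statement) =====
-- stated objective: idiomatic
-- what changed: The per-character column-accumulator loop (result//8*8+8 bookkeeping) is replaced by slicing off the leading space/tab run once and measuring len(lead.expandtabs(8)).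
import Mathlib
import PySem

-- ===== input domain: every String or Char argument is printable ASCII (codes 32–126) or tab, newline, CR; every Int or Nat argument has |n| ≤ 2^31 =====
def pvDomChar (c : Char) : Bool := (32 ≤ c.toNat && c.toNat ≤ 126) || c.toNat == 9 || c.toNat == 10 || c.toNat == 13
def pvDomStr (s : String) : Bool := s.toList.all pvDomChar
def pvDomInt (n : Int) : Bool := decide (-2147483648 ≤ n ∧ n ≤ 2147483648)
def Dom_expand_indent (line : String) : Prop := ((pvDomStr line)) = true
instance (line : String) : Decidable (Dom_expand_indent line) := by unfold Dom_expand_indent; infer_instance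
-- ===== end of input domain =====

-- B replaces A's per-character column-accumulator loop by slicing off the leading
-- space/tab run and measuring the length of its tab expansion (more idiomatic).

-- shared by both ports: line.rstrip('\n\r') (exact: drops trailing chars from the set)
def eiRstripNl (l : List Char) : List Char :=
  (l.reverse.dropWhile (fun c => c == '\n' || c == '\r')).reverse

-- ===== PORT A =====
-- the 'for char in line' accumulator loop of A
def eiLoop : List Char → Int → Int
  | [], r => r
  | c :: rest, r =>
    if c = '\t' then eiLoop rest (PySem.Int.floordiv r 8 * 8 + 8)
    else if c = ' ' then eiLoop rest (r + 1)
    else r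

def expand_indent (line : String) : Int :=
  let l := eiRstripNl line.toList
  if PySem.Chars.isIn ['\t'] l then eiLoop l 0
  else PySem.Chars.len l - PySem.Chars.len (PySem.Chars.lstrip l)

-- ===== PORT B =====
-- str.expandtabs(8) (exact on the chars it meets here; Python also resets the
-- column at '\n'/'\r', kept for faithfulness)
def eiExpandTabs : List Char → Nat → List Char
  | [], _ => []
  | c :: rest, col =>
    if c = '\t' then
      List.replicate (8 - col % 8) ' ' ++ eiExpandTabs rest (col + (8 - col % 8))
    else if c = '\n' ∨ c = '\r' then c :: eiExpandTabs rest 0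
    else c :: eiExpandTabs rest (col + 1)

def expand_indent_alt (line : String) : Int :=
  let l := eiRstripNl line.toList
  if PySem.Chars.isIn ['\t'] l then
    -- stripped = line.lstrip(' \t') (exact: drops leading chars from the set)
    let stripped := l.dropWhile (fun c => c == ' ' || c == '\t')
    -- lead = line[:len(line) - len(stripped)]
    let lead := PySem.List.slice l none (some ((l.length : Int) - stripped.length))
    ((eiExpandTabs lead 0).length : Int)
  else PySem.Chars.len l - PySem.Chars.len (PySem.Chars.lstrip l)

-- ===== PRECONDITION & SPEC =====
def Spec_expand_indent (line : String) (out : Int) : Prop := out = expand_indent_alt line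
instance (line : String) (out : Int) : Decidable (Spec_expand_indent line out) := by unfold Spec_expand_indent; infer_instance

-- ===== CLAIM (what is proved, stated in full; the proofs are below) =====
def Claim_equal_expand_indent : Prop := ∀ (line : String), Dom_expand_indent line → Spec_expand_indent line (expand_indent line)

-- ===== LEMMAS AND PROOFS =====

-- A's loop stops at the first char that is neither ' ' nor '\t'
theorem eiLoop_takeWhile (l : List Char) (r : Int) :
    eiLoop l r = eiLoop (l.takeWhile (fun c => c == ' ' || c == '\t')) r := by
  induction l generalizing r with
  | nil => rfl
  | cons c rest ih =>
    by_cases ht : c = '\t'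
    · simp [eiLoop, ht, ih]
    · by_cases hs : c = ' '
      · simp [eiLoop, hs, ih]
      · simp [eiLoop, ht, hs]

-- on a pure space/tab run, A's accumulator starting at column `col` ends at
-- `col` plus the length of the tab expansion of the run from column `col`
theorem eiLoop_eq_expand (lead : List Char)
    (h : ∀ c ∈ lead, c = ' ' ∨ c = '\t') (col : Nat) :
    eiLoop lead (col : Int) = (col : Int) + (eiExpandTabs lead col).length := by
  induction lead generalizing col with
  | nil => simp [eiLoop, eiExpandTabs]
  | cons c rest ih =>
    have hc := h c (List.mem_cons_self ..)
    have hrest : ∀ x ∈ rest, x = ' ' ∨ x = '\t' := fun x hx => h x (List.mem_cons_of_mem _ hx)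
    rcases hc with hc | hc
    · subst hc
      have : eiLoop (' ' :: rest) (col : Int) = eiLoop rest ((col : Int) + 1) := by
        simp [eiLoop]
      rw [this]
      have : ((col : Int) + 1) = ((col + 1 : Nat) : Int) := by push_cast; ring
      rw [this, ih hrest]
      simp [eiExpandTabs]
      ring
    · subst hc
      have harg : ((col : Int) / 8 * 8 + 8) = ((col + (8 - col % 8) : Nat) : Int) := by
        omega
      have hstep : eiLoop ('\t' :: rest) (col : Int)
          = eiLoop rest ((col : Int).fdiv 8 * 8 + 8) := by
        simp [eiLoop, PySem.Int.floordiv]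
      have h8 : (col : Int).fdiv 8 = (col : Int) / 8 := by
        rw [Int.fdiv_eq_ediv]; simp
      rw [hstep, h8, harg, ih hrest]
      simp [eiExpandTabs]
      omega

-- B's lstrip-then-slice computes the takeWhile prefix
theorem eiLead_eq_takeWhile (l : List Char) :
    PySem.List.slice l none
      (some ((l.length : Int) - (l.dropWhile (fun c => c == ' ' || c == '\t')).length))
      = l.takeWhile (fun c => c == ' ' || c == '\t') := by
  have hlen : (l.dropWhile (fun c => c == ' ' || c == '\t')).length ≤ l.length :=
    List.length_dropWhile_le _ _
  have hk : ((l.length : Int) - (l.dropWhile (fun c => c == ' ' || c == '\t')).length)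
      = ((l.length - (l.dropWhile (fun c => c == ' ' || c == '\t')).length : Nat) : Int) := by
    push_cast [Nat.cast_sub hlen]; ring
  rw [hk, PySem.List.slice_to]
  have htw : l.length - (l.dropWhile (fun c => c == ' ' || c == '\t')).length
      = (l.takeWhile (fun c => c == ' ' || c == '\t')).length := by
    have := List.takeWhile_append_dropWhile (p := fun c => c == ' ' || c == '\t') (l := l)
    have hlen2 : (l.takeWhile (fun c => c == ' ' || c == '\t')).length
        + (l.dropWhile (fun c => c == ' ' || c == '\t')).length = l.length := by
      rw [← List.length_append, this]
    omega
  rw [htw]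
  exact (List.prefix_iff_eq_take.mp (List.takeWhile_prefix _)).symm
  positivity
  
-- ===== VERDICT (by name: the statement is the Claim_ definition above) =====
theorem expand_indent_spec : Claim_equal_expand_indent := by
  intro line _
  unfold Spec_expand_indent expand_indent expand_indent_alt
  set l := eiRstripNl line.toList with hl
  by_cases htab : PySem.Chars.isIn ['\t'] l
  · simp only [htab, if_true]
    rw [eiLead_eq_takeWhile, eiLoop_takeWhile]
    have h : ∀ c ∈ l.takeWhile (fun c => c == ' ' || c == '\t'), c = ' ' ∨ c = '\t' := by
      intro c hc
      have := List.mem_takeWhile_imp hc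
      simpa using this
    have := eiLoop_eq_expand (l.takeWhile (fun c => c == ' ' || c == '\t')) h 0
    simpa using this
  · simp [htab]
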